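-- pv_equiv track=rewrite | github.com/pawal/ipv6.cool | checks/tasks/mail.py | dmarc_find_organizational_domain
-- ===== SOURCE A (Python) =====
-- def dmarc_find_organizational_domain(domain, public_suffix_list):
--     """
--     Find the organizational domain of the given domain.
--
--     Uses mainly the algorithm found at https://publicsuffix.org/list/ to get
--     the organizational domain. Could return "" if none is found.
--
--     """
--     # The algorithm could be more elaborate but this is simple and fast enough.
--     organizational_domain = ""
--     matching_rule = []
--     matching_count = 0
--     matching_exception = False
--     labels = domain.split(".")[::-1]
--     for rule, exception in public_suffix_list:
--         if matching_exception and not exception: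
--             continue
--
--         # We always need to have the whole rule available. zip (later) will
--         # truncate to the shortest list.
--         if len(rule) > len(labels):
--             continue
--
--         matched = 0
--         for a, b in zip(rule, labels):
--             if a in ("*", b):
--                 matched += 1
--             else:
--                 break
--
--         # The whole rule needs to match.
--         if matched == len(rule):
--             if exception:
--                 matching_rule = rule
--                 matching_count = matched
--                 matching_exception = exception
--             elif matched > matching_count:
--                 matching_rule = rule
--                 matching_count = matched
--
--     if matching_rule:
--         if matching_exception:
--             organizational_domain = ".".join(labels[:len(matching_rule)][::-1])
--         elif len(labels) > len(matching_rule):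
--             organizational_domain = ".".join(labels[:matching_count+1][::-1])
--     # Default matching rule is "*"
--     elif len(labels) > 1:
--         organizational_domain = ".".join(labels[:2][::-1])
--
--     return organizational_domain
-- ===== SOURCE B (Python) =====
-- def dmarc_find_organizational_domain(domain, public_suffix_list):
--     """Two-phase re-implementation: first find the last matching exception
--     rule; otherwise take the maximum length among matching normal rules."""
--     labels = domain.split(".")
--     n = len(labels)
--     rev = labels[::-1]
--
--     def matches(rule):
--         return len(rule) <= n and all(a == "*" or a == b for a, b in zip(rule, rev))
--
--     exc = None
--     for rule, exception in public_suffix_list: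
--         if exception and matches(rule):
--             exc = rule
--     if exc is not None:
--         if exc:
--             return ".".join(labels[n - len(exc):])
--     else:
--         m = max((len(r) for r, e in public_suffix_list if not e and matches(r)), default=0)
--         if m > 0:
--             return ".".join(labels[n - m - 1:]) if n > m else ""
--     return ".".join(labels[-2:]) if n > 1 else ""
-- ===== Notes on version B (the rewrite author's own statement) =====
-- stated objective: simpler
-- what changed: Replaced A's single fold over a three-component mutable state (rule/count/exception with skip logic) by two independent passes: pick the last matching exception rule, else the maximum matched length among normal rules, then slice the label suffix directly instead of double-reversing.
import Mathlib
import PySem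

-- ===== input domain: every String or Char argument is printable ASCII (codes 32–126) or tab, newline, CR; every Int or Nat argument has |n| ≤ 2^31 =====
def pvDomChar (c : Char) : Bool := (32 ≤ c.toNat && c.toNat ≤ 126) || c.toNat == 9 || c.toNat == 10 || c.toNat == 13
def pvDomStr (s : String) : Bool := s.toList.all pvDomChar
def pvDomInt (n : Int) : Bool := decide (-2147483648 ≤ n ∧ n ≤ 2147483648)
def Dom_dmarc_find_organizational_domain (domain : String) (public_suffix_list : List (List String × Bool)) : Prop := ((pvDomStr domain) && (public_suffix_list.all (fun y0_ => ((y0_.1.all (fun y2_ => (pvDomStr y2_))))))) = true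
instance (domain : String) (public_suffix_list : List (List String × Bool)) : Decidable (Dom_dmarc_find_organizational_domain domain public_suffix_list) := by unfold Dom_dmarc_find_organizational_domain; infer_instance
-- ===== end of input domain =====

-- B replaces A's single stateful scan (rule/count/exception with skip logic) by two
-- independent passes (last matching exception rule, else maximum matched rule length)
-- and slices the label suffix directly; same cost, simpler decomposition.

-- ===== PORT A =====
-- the inner 'for a, b in zip(rule, labels): … break' loop: counts the matching prefix
def pvMatchedA : List String → List String → Nat
  | [], _ => 0
  | _ :: _, [] => 0
  | a :: rs, b :: ls => if a = "*" ∨ a = b then 1 + pvMatchedA rs ls else 0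

-- one iteration of A's main loop; state = (matching_rule, matching_count, matching_exception)
def pvStepA (labels : List String) (st : List String × Nat × Bool) (p : List String × Bool) :
    List String × Nat × Bool :=
  if st.2.2 ∧ ¬ p.2 then st
  else if labels.length < p.1.length then st
  else
    let matched := pvMatchedA p.1 labels
    if matched = p.1.length then
      if p.2 then (p.1, matched, p.2)
      else if st.2.1 < matched then (p.1, matched, st.2.2)
      else st
    else st

def dmarc_find_organizational_domain (domain : String) (public_suffix_list : List (List String × Bool)) : String :=
  -- labels = domain.split(".")[::-1] ; labels[:k] with k ≥ 0 is List.take k, [::-1] is reverse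
  -- domain.split(".") with the non-empty separator "." : PySem.Str.split? returns some
  let labels := ((PySem.Str.split? domain ".").getD []).reverse
  let st := public_suffix_list.foldl (pvStepA labels) ([], 0, false)
  if st.1 ≠ [] then
    if st.2.2 then PySem.Str.join "." ((labels.take st.1.length).reverse)
    else if st.1.length < labels.length then PySem.Str.join "." ((labels.take (st.2.1 + 1)).reverse)
    else ""
  else if 1 < labels.length then PySem.Str.join "." ((labels.take 2).reverse)
  else ""

-- ===== PORT B =====
-- Source B's 'matches(rule)' helper
def pvMatchesB (n : Nat) (rev : List String) (rule : List String) : Bool :=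
  decide (rule.length ≤ n) && (rule.zip rev).all (fun q => q.1 == "*" || q.1 == q.2)

-- Source B's first pass: the last matching exception rule, if any
def pvExcB (n : Nat) (rev : List String) (l : List (List String × Bool)) : Option (List String) :=
  l.foldl (fun acc p => if p.2 && pvMatchesB n rev p.1 then some p.1 else acc) none

-- Source B's 'max(…, default=0)' over the matching normal rules
def pvMaxB (n : Nat) (rev : List String) (l : List (List String × Bool)) : Nat :=
  ((l.filter (fun p => !p.2 && pvMatchesB n rev p.1)).map (fun p => p.1.length)).foldl max 0

def dmarc_find_organizational_domain_alt (domain : String) (public_suffix_list : List (List String × Bool)) : String :=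
  let labels := (PySem.Str.split? domain ".").getD []
  let n := labels.length
  let rev := labels.reverse
  -- labels[-2:] under the guard 1 < n is labels.drop (n-2); labels[k:] with 0 ≤ k is drop
  match pvExcB n rev public_suffix_list with
  | some r =>
    if r ≠ [] then PySem.Str.join "." (labels.drop (n - r.length))
    else if 1 < n then PySem.Str.join "." (labels.drop (n - 2)) else ""
  | none =>
    let m := pvMaxB n rev public_suffix_list
    if 0 < m then
      if m < n then PySem.Str.join "." (labels.drop (n - m - 1)) else ""
    else if 1 < n then PySem.Str.join "." (labels.drop (n - 2)) else ""

-- ===== PRECONDITION & SPEC =====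
def Spec_dmarc_find_organizational_domain (domain : String) (public_suffix_list : List (List String × Bool)) (out : String) : Prop := out = dmarc_find_organizational_domain_alt domain public_suffix_list
instance (domain : String) (public_suffix_list : List (List String × Bool)) (out : String) : Decidable (Spec_dmarc_find_organizational_domain domain public_suffix_list out) := by unfold Spec_dmarc_find_organizational_domain; infer_instance

-- ===== CLAIM (what is proved, stated in full; the proofs are below) =====
def Claim_equal_dmarc_find_organizational_domain : Prop := ∀ (domain : String) (public_suffix_list : List (List String × Bool)), Dom_dmarc_find_organizational_domain domain public_suffix_list → Spec_dmarc_find_organizational_domain domain public_suffix_list (dmarc_find_organizational_domain domain public_suffix_list)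

-- ===== LEMMAS AND PROOFS =====

-- A's prefix counter reaches the full rule length iff B's zip-all test succeeds
lemma pvMatchedA_full_iff (rule rev : List String) (h : rule.length ≤ rev.length) :
    pvMatchedA rule rev = rule.length ↔
      ((rule.zip rev).all (fun q => q.1 == "*" || q.1 == q.2) = true) := by
  induction rule generalizing rev with
  | nil => simp [pvMatchedA]
  | cons a rs ih =>
    cases rev with
    | nil => simp at h
    | cons b ls =>
      simp only [List.length_cons, Nat.add_le_add_iff_right] at h
      simp only [pvMatchedA, List.zip_cons_cons, List.all_cons, List.length_cons]
      by_cases hc : a = "*" ∨ a = b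
      · have hb : (a == "*" || a == b) = true := by simpa using hc
        rw [if_pos hc, hb, Bool.true_and, ← ih ls h]
        omega
      · have hb : (a == "*" || a == b) = false := by
          simp only [Bool.or_eq_false_iff, beq_eq_false_iff_ne, ne_eq]
          exact ⟨fun h1 => hc (Or.inl h1), fun h2 => hc (Or.inr h2)⟩
        rw [if_neg hc, hb, Bool.false_and]
        constructor
        · intro he; omega
        · intro he; simp at he

-- one step of A's fold, characterised through B's match test
lemma pvStepA_char (rev : List String) (st : List String × Nat × Bool) (p : List String × Bool) :
    pvStepA rev st p =
      if pvMatchesB rev.length rev p.1 = true then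
        (if p.2 then (p.1, p.1.length, true)
         else if st.2.2 then st
         else if st.2.1 < p.1.length then (p.1, p.1.length, st.2.2) else st)
      else st := by
  obtain ⟨rule, e⟩ := p
  obtain ⟨mr, mc, me⟩ := st
  simp only [pvStepA, pvMatchesB]
  by_cases hle : rule.length ≤ rev.length
  · have hiff := pvMatchedA_full_iff rule rev hle
    by_cases hall : ((rule.zip rev).all (fun q => q.1 == "*" || q.1 == q.2)) = true
    · have hmt : pvMatchedA rule rev = rule.length := hiff.mpr hall
      rw [hmt]
      have hnl : ¬ rev.length < rule.length := by omega
      cases e <;> cases me <;>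
        simp [hle, hall, hnl] <;> (try split_ifs) <;>
          first | rfl | omega | simp_all | tauto
    · have hmt : pvMatchedA rule rev ≠ rule.length := fun hx => hall (hiff.mp hx)
      have hnl : ¬ rev.length < rule.length := by omega
      cases e <;> cases me <;>
        simp [hall, hnl] <;> (try split_ifs) <;>
          first | rfl | omega | simp_all | tauto
  · have hnl : rev.length < rule.length := by omega
    have hd : decide (rule.length ≤ rev.length) = false := by simpa using hle
    cases e <;> cases me <;>
      simp [hd, hnl] <;> (try split_ifs) <;>
        first | rfl | omega | simp_all | tauto

-- snoc laws for B's two folds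
lemma pvExcB_snoc (n : Nat) (rev : List String) (l : List (List String × Bool)) (x : List String × Bool) :
    pvExcB n rev (l ++ [x]) =
      if x.2 && pvMatchesB n rev x.1 then some x.1 else pvExcB n rev l := by
  unfold pvExcB
  rw [List.foldl_append]
  rfl

lemma pvMaxB_snoc (n : Nat) (rev : List String) (l : List (List String × Bool)) (x : List String × Bool) :
    pvMaxB n rev (l ++ [x]) =
      if (!x.2 && pvMatchesB n rev x.1) = true then max (pvMaxB n rev l) x.1.length
      else pvMaxB n rev l := by
  unfold pvMaxB
  rw [List.filter_append, List.filter_singleton]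
  split_ifs with h
  · simp only [h, cond_true]
    rw [List.map_append, List.foldl_append]
    rfl
  · simp only [Bool.not_eq_true] at h
    simp only [h, cond_false, List.append_nil]

-- the fold invariant relating A's state to B's two passes
lemma pv_inv (rev : List String) (l : List (List String × Bool)) :
    (∀ r, pvExcB rev.length rev l = some r →
        l.foldl (pvStepA rev) ([], 0, false) = (r, r.length, true) ∧ r.length ≤ rev.length) ∧
    (pvExcB rev.length rev l = none →
        (l.foldl (pvStepA rev) ([], 0, false)).2.2 = false ∧
        (l.foldl (pvStepA rev) ([], 0, false)).1.length = pvMaxB rev.length rev l ∧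
        (l.foldl (pvStepA rev) ([], 0, false)).2.1 = pvMaxB rev.length rev l) := by
  induction l using List.reverseRecOn with
  | nil =>
    constructor
    · intro r hr; simp [pvExcB] at hr
    · intro _; simp [pvMaxB]
  | append_singleton l x ih =>
    obtain ⟨xr, xe⟩ := x
    rw [List.foldl_append, List.foldl_cons, List.foldl_nil, pvStepA_char]
    rcases ih with ⟨ihS, ihN⟩
    by_cases hmx : pvMatchesB rev.length rev xr = true
    · have hxlen : xr.length ≤ rev.length := by
        have h2 := hmx
        unfold pvMatchesB at h2
        simp only [Bool.and_eq_true, decide_eq_true_eq] at h2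
        exact h2.1
      cases xe with
      | true =>
        constructor
        · intro r hr
          rw [pvExcB_snoc] at hr
          simp [hmx] at hr
          subst hr
          exact ⟨by simp [hmx], hxlen⟩
        · intro hnone
          rw [pvExcB_snoc] at hnone
          simp [hmx] at hnone
      | false =>
        constructor
        · intro r hr
          rw [pvExcB_snoc] at hr
          simp at hr
          rcases ihS r hr with ⟨hst, hrl⟩
          rw [hst]
          exact ⟨by simp [hmx], hrl⟩
        · intro hnone
          rw [pvExcB_snoc] at hnone
          simp at hnone
          rcases ihN hnone with ⟨hE, hL, hC⟩
          rw [pvMaxB_snoc]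
          set st := l.foldl (pvStepA rev) ([], 0, false) with hstdef
          by_cases hlt : st.2.1 < xr.length
          · simp [hmx, hE, hlt]
            omega
          · simp [hmx, hE, hlt]
            omega
    · have hmx' : pvMatchesB rev.length rev xr = false := by
        simpa using hmx
      rw [if_neg (by simp [hmx'])]
      constructor
      · intro r hr
        rw [pvExcB_snoc] at hr
        simp [hmx'] at hr
        exact ihS r hr
      · intro hnone
        rw [pvExcB_snoc] at hnone
        simp [hmx'] at hnone
        rw [pvMaxB_snoc]
        simp [hmx']
        exact ihN hnone

-- taking k labels of the reversed list and reversing back = dropping the first n-k labels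
lemma pv_take_reverse (l : List String) (k : Nat) :
    (l.reverse.take k).reverse = l.drop (l.length - k) := by
  rw [List.take_reverse, List.reverse_reverse]

-- ===== VERDICT (by name: the statement is the Claim_ definition above) =====
theorem dmarc_find_organizational_domain_spec : Claim_equal_dmarc_find_organizational_domain := by
  intro domain psl _
  unfold Spec_dmarc_find_organizational_domain
  simp only [dmarc_find_organizational_domain, dmarc_find_organizational_domain_alt]
  set labels := (PySem.Str.split? domain ".").getD [] with hlabels
  have hinv := pv_inv labels.reverse psl
  simp only [List.length_reverse] at hinv ⊢
  rcases hinv with ⟨hS, hN⟩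
  cases hexc : pvExcB labels.length labels.reverse psl with
  | some r =>
    rcases hS r hexc with ⟨hst, hrlen⟩
    rw [hst]
    simp only [hexc]
    by_cases hr : r = []
    · subst hr
      simp [pv_take_reverse]
    · simp [hr, pv_take_reverse]
  | none =>
    rcases hN hexc with ⟨hE, hL, hC⟩
    simp only [hexc]
    set st := psl.foldl (pvStepA labels.reverse) ([], 0, false) with hstdef
    by_cases h0 : 0 < pvMaxB labels.length labels.reverse psl
    · have hne : st.1 ≠ [] := by
        intro h; rw [h] at hL; simp at hL; omega
      by_cases hlt : pvMaxB labels.length labels.reverse psl < labels.length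
      · simp [hne, hE, hL, hC, hlt, h0, pv_take_reverse, Nat.sub_sub]
      · simp [hne, hE, hL, hC, hlt, h0]
    · have heq : st.1 = [] := by
        refine List.eq_nil_of_length_eq_zero ?_
        omega
      simp [heq, h0, pv_take_reverse]
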